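-- pv_equiv track=rewrite | github.com/mfshi03/VT-ICPC | python/birthdaygift.py | count_interesting_numbers
-- ===== SOURCE A (Python) =====
-- MOD = 10**9 + 7
--
-- def count_interesting_numbers(a, b):
--     dp = [[[0 for _ in range(225)] for _ in range(a + 1)] for _ in range(10)]
--
--     for i in range(10):
--         dp[i][1][i % 225] = 1
--
--     for length in range(2, a + 1):
--         for last_digit in range(10):
--             for mod in range(225):
--                 for next_digit in range(10):
--                     if next_digit != last_digit:
--                         new_mod = (mod * 10 + next_digit) % 225
--                         dp[next_digit][length][new_mod] += dp[last_digit][length - 1][mod]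
--                         dp[next_digit][length][new_mod] %= MOD
--
--     result = sum(dp[digit][a][b % 225] for digit in range(10)) % MOD
--     return result
-- ===== SOURCE B (Python) =====
-- MOD = 10**9 + 7
--
-- def count_interesting_numbers(a, b):
--     # rolling 10x225 state (last_digit, value mod 225), pull-style layer update:
--     # new[d][nm] = sum over preimage mods m of (column_sum[m] - cur[d][m]), all mod MOD.
--     pre = [[[m for m in range(225) if (10 * m + d) % 225 == nm]
--             for nm in range(225)] for d in range(10)]
--     cur = [[1 if m == d % 225 else 0 for m in range(225)] for d in range(10)]
--     for _ in range(a - 1):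
--         col = [sum(cur[d][m] for d in range(10)) % MOD for m in range(225)]
--         cur = [[sum(col[m] - cur[d][m] for m in pre[d][nm]) % MOD
--                 for nm in range(225)] for d in range(10)]
--     return sum(cur[d][b % 225] for d in range(10)) % MOD
-- ===== Notes on version B (the rewrite author's own statement) =====
-- stated objective: faster
-- what changed: B replaces A's 3D per-length table and innermost next-digit push loop by a rolling 10x225 table updated pull-style from precomputed preimage-mod lists and per-mod column sums (sum over digits != d computed as column total minus own entry), cutting the per-length work by roughly an order of magnitude.
import Mathlib
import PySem

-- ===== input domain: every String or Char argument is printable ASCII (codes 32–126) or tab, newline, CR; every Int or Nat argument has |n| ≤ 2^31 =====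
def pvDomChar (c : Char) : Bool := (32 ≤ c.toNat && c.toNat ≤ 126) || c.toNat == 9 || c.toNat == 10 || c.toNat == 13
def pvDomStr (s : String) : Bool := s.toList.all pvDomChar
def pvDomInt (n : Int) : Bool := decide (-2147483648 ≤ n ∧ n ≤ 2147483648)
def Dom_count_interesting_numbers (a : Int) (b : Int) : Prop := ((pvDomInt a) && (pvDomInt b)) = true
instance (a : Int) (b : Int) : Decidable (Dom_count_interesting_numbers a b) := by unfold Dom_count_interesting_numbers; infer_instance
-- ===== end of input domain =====

-- B replaces the 3D per-length table and inner next-digit loop of A by a rolling 10x225 table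
-- updated pull-style from precomputed preimage lists and column sums; measured constant-factor faster.

-- ===== PORT A =====
def pyMOD : Int := 10 ^ 9 + 7

-- read dp[d][L][m]; the defaults are never reached on the in-range indices the loops produce
def aGet3 (dp : List (List (List Int))) (d L m : Int) : Int :=
  PySem.List.pyGetD (PySem.List.pyGetD (PySem.List.pyGetD dp d []) L []) m 0

-- dp[d][L][m] = v as a functional read-modify-write; exact for in-range indices
def aSet3 (dp : List (List (List Int))) (d L m : Int) (v : Int) : List (List (List Int)) :=
  PySem.List.pySetD dp d
    (PySem.List.pySetD (PySem.List.pyGetD dp d []) L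
      (PySem.List.pySetD (PySem.List.pyGetD (PySem.List.pyGetD dp d []) L []) m v))

def count_interesting_numbers (a : Int) (b : Int) : Int :=
  let dp0 : List (List (List Int)) :=
    (PySem.List.pyRange 0 10 1).map (fun _ =>
      (PySem.List.pyRange 0 (a + 1) 1).map (fun _ =>
        (PySem.List.pyRange 0 225 1).map (fun _ => (0 : Int))))
  let dp1 := (PySem.List.pyRange 0 10 1).foldl
    (fun dp i => aSet3 dp i 1 (PySem.Int.mod i 225) 1) dp0
  let dp2 := (PySem.List.pyRange 2 (a + 1) 1).foldl (fun dp length =>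
    (PySem.List.pyRange 0 10 1).foldl (fun dp last_digit =>
      (PySem.List.pyRange 0 225 1).foldl (fun dp md =>
        (PySem.List.pyRange 0 10 1).foldl (fun dp next_digit =>
          if next_digit ≠ last_digit then
            let new_mod := PySem.Int.mod (md * 10 + next_digit) 225
            let dp' := aSet3 dp next_digit length new_mod
              (aGet3 dp next_digit length new_mod + aGet3 dp last_digit (length - 1) md)
            aSet3 dp' next_digit length new_mod
              (PySem.Int.mod (aGet3 dp' next_digit length new_mod) pyMOD)
          else dp) dp) dp) dp) dp1
  PySem.Int.mod
    (((PySem.List.pyRange 0 10 1).map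
      (fun digit => aGet3 dp2 digit a (PySem.Int.mod b 225))).sum) pyMOD

-- ===== PORT B =====
-- read xs[i][j] of a 10x225 table; defaults unreachable on in-range indices
def bGet2 (xs : List (List Int)) (i j : Int) : Int :=
  PySem.List.pyGetD (PySem.List.pyGetD xs i []) j 0

-- read pre[i][j]
def bGetL (xs : List (List (List Int))) (i j : Int) : List Int :=
  PySem.List.pyGetD (PySem.List.pyGetD xs i []) j []

def count_interesting_numbers_alt (a : Int) (b : Int) : Int :=
  let pre : List (List (List Int)) :=
    (PySem.List.pyRange 0 10 1).map (fun d =>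
      (PySem.List.pyRange 0 225 1).map (fun nm =>
        (PySem.List.pyRange 0 225 1).filter
          (fun m => PySem.Int.mod (10 * m + d) 225 == nm)))
  let cur0 : List (List Int) :=
    (PySem.List.pyRange 0 10 1).map (fun d =>
      (PySem.List.pyRange 0 225 1).map
        (fun m => if m == PySem.Int.mod d 225 then (1 : Int) else 0))
  let cur := (PySem.List.pyRange 0 (a - 1) 1).foldl (fun cur _ =>
    let col : List Int := (PySem.List.pyRange 0 225 1).map (fun m =>
      PySem.Int.mod (((PySem.List.pyRange 0 10 1).map (fun d => bGet2 cur d m)).sum) pyMOD)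
    (PySem.List.pyRange 0 10 1).map (fun d =>
      (PySem.List.pyRange 0 225 1).map (fun nm =>
        PySem.Int.mod
          (((bGetL pre d nm).map
            (fun m => PySem.List.pyGetD col m 0 - bGet2 cur d m)).sum) pyMOD))) cur0
  PySem.Int.mod
    (((PySem.List.pyRange 0 10 1).map
      (fun d => bGet2 cur d (PySem.Int.mod b 225))).sum) pyMOD

-- ===== PRECONDITION & SPEC =====
-- Pre_ excludes a ≤ 0, where A raises IndexError (its dp rows have no index 1).
def Pre_count_interesting_numbers (a : Int) (b : Int) : Prop := 1 ≤ a
instance (a : Int) (b : Int) : Decidable (Pre_count_interesting_numbers a b) := by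
  unfold Pre_count_interesting_numbers; infer_instance

def pvWitness_count_interesting_numbers : Int × Int := (1, 0)

def Spec_count_interesting_numbers (a : Int) (b : Int) (out : Int) : Prop :=
  out = count_interesting_numbers_alt a b
instance (a : Int) (b : Int) (out : Int) : Decidable (Spec_count_interesting_numbers a b out) := by
  unfold Spec_count_interesting_numbers; infer_instance

-- ===== CLAIM (what is proved, stated in full; the proofs are below) =====
def Claim_equal_count_interesting_numbers : Prop := ∀ (a : Int) (b : Int), Dom_count_interesting_numbers a b → Pre_count_interesting_numbers a b → Spec_count_interesting_numbers a b (count_interesting_numbers a b)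

-- ===== LEMMAS AND PROOFS =====

-- shape invariant of A's 3D table
def Sh (dp : List (List (List Int))) (a : Int) : Prop :=
  dp.length = 10 ∧ ∀ row ∈ dp, row.length = (a + 1).toNat ∧ ∀ cell ∈ row, cell.length = 225

theorem row_facts {dp : List (List (List Int))} {a' : Int} (hsh : Sh dp a')
    {d : Int} (hd : 0 ≤ d ∧ d < 10) :
    PySem.List.pyGetD dp d [] ∈ dp ∧
      (PySem.List.pyGetD dp d []).length = (a' + 1).toNat ∧
      ∀ cell ∈ PySem.List.pyGetD dp d [], cell.length = 225 := by
  obtain ⟨h10, hrows⟩ := hsh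
  have hmem : PySem.List.pyGetD dp d [] ∈ dp := by
    apply PySem.List.pyGetD_mem
    constructor <;> [skip; skip] <;> simp [h10] <;> omega
  exact ⟨hmem, (hrows _ hmem).1, (hrows _ hmem).2⟩

theorem cell_facts {dp : List (List (List Int))} {a' : Int} (hsh : Sh dp a')
    {d L : Int} (hd : 0 ≤ d ∧ d < 10) (hL : 0 ≤ L ∧ L < a' + 1) :
    (PySem.List.pyGetD (PySem.List.pyGetD dp d []) L []).length = 225 := by
  obtain ⟨-, hlen, hcells⟩ := row_facts hsh hd
  apply hcells
  apply PySem.List.pyGetD_mem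
  constructor <;> simp [hlen] <;> omega

theorem sh_set3 {dp : List (List (List Int))} {a' : Int} (hsh : Sh dp a')
    {d L m : Int} (v : Int) (hd : 0 ≤ d ∧ d < 10) (hL : 0 ≤ L ∧ L < a' + 1) (hm : 0 ≤ m) :
    Sh (aSet3 dp d L m v) a' := by
  obtain ⟨hmem, hlen, hcells⟩ := row_facts hsh hd
  have hclen := cell_facts hsh hd hL
  obtain ⟨h10, hrows⟩ := hsh
  unfold aSet3
  rw [PySem.List.pySetD_of_nonneg _ _ hd.1, PySem.List.pySetD_of_nonneg _ _ hL.1,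
    PySem.List.pySetD_of_nonneg _ _ hm]
  refine ⟨by simp [h10], ?_⟩
  intro row hrow
  rcases List.mem_or_eq_of_mem_set hrow with h | h
  · exact hrows row h
  · subst h
    refine ⟨by simp [hlen], ?_⟩
    intro cell hcell
    rcases List.mem_or_eq_of_mem_set hcell with h | h
    · exact hcells cell h
    · subst h; simp [hclen]

theorem get3_set3 {dp : List (List (List Int))} {a' : Int} (hsh : Sh dp a')
    {d L m d' L' m' : Int} (v : Int)
    (hd : 0 ≤ d ∧ d < 10) (hL : 0 ≤ L ∧ L < a' + 1) (hm : 0 ≤ m ∧ m < 225)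
    (hd' : 0 ≤ d' ∧ d' < 10) (hL' : 0 ≤ L' ∧ L' < a' + 1) (hm' : 0 ≤ m' ∧ m' < 225) :
    aGet3 (aSet3 dp d L m v) d' L' m' =
      if d' = d ∧ L' = L ∧ m' = m then v else aGet3 dp d' L' m' := by
  obtain ⟨hmem, hlen, hcells⟩ := row_facts hsh hd
  have hclen := cell_facts hsh hd hL
  obtain ⟨h10, hrows⟩ := hsh
  have hLpos : 0 < a' + 1 := by omega
  unfold aSet3 aGet3
  rw [PySem.List.pySetD_of_nonneg _ _ hd.1, PySem.List.pySetD_of_nonneg _ _ hL.1,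
    PySem.List.pySetD_of_nonneg _ _ hm.1]
  set r0 := PySem.List.pyGetD dp d [] with hr0
  set c0 := PySem.List.pyGetD r0 L [] with hc0
  set X := dp.set d.toNat (r0.set L.toNat (c0.set m.toNat v)) with hX
  have hXlen : X.length = 10 := by simp [hX, h10]
  have h1 : PySem.List.pyGetD X d' [] = X[d'.toNat]'(by omega) := by
    apply PySem.List.pyGetD_eq_getElem _ _ hd'.1; simp [hXlen]; omega
  rw [h1]
  have h2 : X[d'.toNat]'(by omega) =
      if d.toNat = d'.toNat then r0.set L.toNat (c0.set m.toNat v)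
      else dp[d'.toNat]'(by omega) := by
    simp [hX, List.getElem_set]
  by_cases hdd : d' = d
  · subst hdd
    rw [h2, if_pos (by omega)]
    have hrow' : (r0.set L.toNat (c0.set m.toNat v)).length = (a' + 1).toNat := by simp [hlen]
    have h3 : PySem.List.pyGetD (r0.set L.toNat (c0.set m.toNat v)) L' [] =
        (r0.set L.toNat (c0.set m.toNat v))[L'.toNat]'(by omega) := by
      apply PySem.List.pyGetD_eq_getElem _ _ hL'.1; simp [hrow']; omega
    rw [h3]
    have h4 : (r0.set L.toNat (c0.set m.toNat v))[L'.toNat]'(by omega) =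
        if L.toNat = L'.toNat then c0.set m.toNat v else r0[L'.toNat]'(by simp [hlen]; omega) := by
      simp [List.getElem_set]
    rw [h4]
    have hdp_rd : PySem.List.pyGetD dp d' [] = r0 := hr0.symm
    by_cases hLL : L' = L
    · subst hLL
      rw [if_pos rfl]
      have h5 : PySem.List.pyGetD (c0.set m.toNat v) m' 0 =
          (c0.set m.toNat v)[m'.toNat]'(by simp [hclen]; omega) := by
        apply PySem.List.pyGetD_eq_getElem _ _ hm'.1; simp [hclen]; omega
      rw [h5]
      have h6 : (c0.set m.toNat v)[m'.toNat]'(by simp [hclen]; omega) =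
          if m.toNat = m'.toNat then v else c0[m'.toNat]'(by simp [hclen]; omega) := by
        simp [List.getElem_set]
      rw [h6]
      by_cases hmm : m' = m
      · subst hmm; rw [if_pos (by omega), if_pos ⟨rfl, rfl, rfl⟩]
      · rw [if_neg (by omega), if_neg (by tauto)]
        rw [← hr0, ← hc0]
        symm
        apply PySem.List.pyGetD_eq_getElem _ _ hm'.1; simp [hclen]; omega
    · rw [if_neg (by omega), if_neg (by tauto), ← hr0]
      congr 1
      symm
      apply PySem.List.pyGetD_eq_getElem _ _ hL'.1; simp [hlen]; omega
  · rw [h2, if_neg (by omega), if_neg (by tauto)]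
    congr 2
    symm
    apply PySem.List.pyGetD_eq_getElem _ _ hd'.1; simp [h10]; omega

def cellStep (t : Int → Int → Int) (d m : Int) (x : Int) (p : Int × Int) : Int :=
  if d ≠ p.1 ∧ m = PySem.Int.mod (p.2 * 10 + d) 225 then PySem.Int.mod (x + t p.1 p.2) pyMOD else x

def nbody (l L md : Int) (dp : List (List (List Int))) (next_digit : Int) :
    List (List (List Int)) :=
  if next_digit ≠ l then
    let new_mod := PySem.Int.mod (md * 10 + next_digit) 225
    let dp' := aSet3 dp next_digit L new_mod
      (aGet3 dp next_digit L new_mod + aGet3 dp l (L - 1) md)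
    aSet3 dp' next_digit L new_mod (PySem.Int.mod (aGet3 dp' next_digit L new_mod) pyMOD)
  else dp

theorem nextLoop {a' : Int} {l md L : Int}
    (hl : 0 ≤ l ∧ l < 10) (hmd : 0 ≤ md ∧ md < 225) (hL2 : 2 ≤ L) (hLa : L ≤ a') :
    ∀ (ns : List Int) (dp : List (List (List Int))),
    (∀ x ∈ ns, 0 ≤ x ∧ x < 10) → ns.Nodup → Sh dp a' →
    Sh (ns.foldl (nbody l L md) dp) a' ∧
    (∀ d L' m : Int, 0 ≤ d ∧ d < 10 → 0 ≤ L' ∧ L' < a' + 1 → 0 ≤ m ∧ m < 225 → L' ≠ L →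
      aGet3 (ns.foldl (nbody l L md) dp) d L' m = aGet3 dp d L' m) ∧
    (∀ d m : Int, 0 ≤ d ∧ d < 10 → 0 ≤ m ∧ m < 225 →
      aGet3 (ns.foldl (nbody l L md) dp) d L m =
        if d ∈ ns ∧ d ≠ l ∧ m = PySem.Int.mod (md * 10 + d) 225 then
          PySem.Int.mod (aGet3 dp d L m + aGet3 dp l (L - 1) md) pyMOD
        else aGet3 dp d L m) := by
  intro ns
  induction ns with
  | nil => intro dp _ _ hsh; exact ⟨hsh, fun _ _ _ _ _ _ _ => rfl, fun d m _ _ => by simp⟩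
  | cons n ns ih =>
    intro dp hbnd hnd hsh
    have hn : 0 ≤ n ∧ n < 10 := hbnd n (by simp)
    have hnotmem : n ∉ ns := (List.nodup_cons.mp hnd).1
    have hnd' : ns.Nodup := (List.nodup_cons.mp hnd).2
    have hbnd' : ∀ x ∈ ns, 0 ≤ x ∧ x < 10 := fun x hx => hbnd x (List.mem_cons_of_mem _ hx)
    have hLr : 0 ≤ L ∧ L < a' + 1 := ⟨by omega, by omega⟩
    have hL1r : 0 ≤ L - 1 ∧ L - 1 < a' + 1 := ⟨by omega, by omega⟩
    by_cases hne : n ≠ l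
    · -- one real update
      set nm := PySem.Int.mod (md * 10 + n) 225 with hnm
      have hnmr : 0 ≤ nm ∧ nm < 225 := by
        constructor
        · rw [hnm, PySem.Int.mod_eq_emod_of_pos (by norm_num)]; exact Int.emod_nonneg _ (by norm_num)
        · rw [hnm, PySem.Int.mod_eq_emod_of_pos (by norm_num)]; exact Int.emod_lt_of_pos _ (by norm_num)
      have hstep : (nbody l L md dp n) =
          aSet3 (aSet3 dp n L nm (aGet3 dp n L nm + aGet3 dp l (L-1) md)) n L nm
            (PySem.Int.mod (aGet3 (aSet3 dp n L nm (aGet3 dp n L nm + aGet3 dp l (L-1) md)) n L nm) pyMOD) := by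
        simp only [nbody, if_pos hne, ← hnm]
      set X1 := aSet3 dp n L nm (aGet3 dp n L nm + aGet3 dp l (L-1) md) with hX1
      have hshX1 : Sh X1 a' := sh_set3 hsh _ hn hLr hnmr.1
      have hget1 : aGet3 X1 n L nm = aGet3 dp n L nm + aGet3 dp l (L-1) md := by
        rw [hX1, get3_set3 hsh _ hn hLr hnmr hn hLr hnmr, if_pos ⟨rfl, rfl, rfl⟩]
      set X2 := aSet3 X1 n L nm (PySem.Int.mod (aGet3 X1 n L nm) pyMOD) with hX2
      have hshX2 : Sh X2 a' := sh_set3 hshX1 _ hn hLr hnmr.1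
      have hstep2 : nbody l L md dp n = X2 := by rw [hstep, hX2, hX1]
      have hgetX2 : ∀ d L' m : Int, 0 ≤ d ∧ d < 10 → 0 ≤ L' ∧ L' < a' + 1 → 0 ≤ m ∧ m < 225 →
          aGet3 X2 d L' m =
            if d = n ∧ L' = L ∧ m = nm then
              PySem.Int.mod (aGet3 dp d L' m + aGet3 dp l (L-1) md) pyMOD
            else aGet3 dp d L' m := by
        intro d L' m hd hL' hm
        rw [hX2, get3_set3 hshX1 _ hn hLr hnmr hd hL' hm]
        by_cases hc : d = n ∧ L' = L ∧ m = nm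
        · rw [if_pos hc, if_pos hc, hget1]
          obtain ⟨h1, h2, h3⟩ := hc; subst h1; subst h2; subst h3; rfl
        · rw [if_neg hc, if_neg hc, hX1, get3_set3 hsh _ hn hLr hnmr hd hL' hm, if_neg hc]
      obtain ⟨ihSh, ihOther, ihRow⟩ := ih X2 hbnd' hnd' hshX2
      have hfold : (n :: ns).foldl (nbody l L md) dp = ns.foldl (nbody l L md) X2 := by
        simp [List.foldl_cons, hstep2]
      refine ⟨by rw [hfold]; exact ihSh, ?_, ?_⟩
      · intro d L' m hd hL' hm hLne
        rw [hfold, ihOther d L' m hd hL' hm hLne, hgetX2 d L' m hd hL' hm,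
          if_neg (by tauto)]
      · intro d m hd hm
        rw [hfold, ihRow d m hd hm]
        have hl1 : aGet3 X2 l (L-1) md = aGet3 dp l (L-1) md := by
          rw [hgetX2 l (L-1) md hl hL1r hmd, if_neg (by omega)]
        rw [hl1]
        by_cases hmem : d ∈ ns ∧ d ≠ l ∧ m = PySem.Int.mod (md * 10 + d) 225
        · rw [if_pos hmem, if_pos ⟨List.mem_cons_of_mem _ hmem.1, hmem.2⟩]
          have : aGet3 X2 d L m = aGet3 dp d L m := by
            rw [hgetX2 d L m hd hLr hm, if_neg (by rintro ⟨h1, -, -⟩; exact hnotmem (h1 ▸ hmem.1))]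
          rw [this]
        · rw [if_neg hmem, hgetX2 d L m hd hLr hm]
          by_cases hdn : d = n ∧ L = L ∧ m = nm
          · rw [if_pos hdn, if_pos (by
              refine ⟨hdn.1 ▸ List.mem_cons_self .., hdn.1 ▸ hne, ?_⟩
              rw [hdn.1, ← hnm]; exact hdn.2.2)]
          · rw [if_neg hdn, if_neg (by
              rintro ⟨hmem1, hne1, heq1⟩
              rcases List.mem_cons.mp hmem1 with h | h
              · exact hdn ⟨h, rfl, heq1.trans (by rw [h, ← hnm])⟩
              · exact hmem ⟨h, hne1, heq1⟩)]
    · -- n = l : skipped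
      rw [not_ne_iff] at hne; subst hne
      have hfold : (n :: ns).foldl (nbody n L md) dp = ns.foldl (nbody n L md) dp := by
        simp [List.foldl_cons, nbody]
      obtain ⟨ihSh, ihOther, ihRow⟩ := ih dp hbnd' hnd' hsh
      refine ⟨by rw [hfold]; exact ihSh, fun d L' m hd hL' hm hLne => by
          rw [hfold]; exact ihOther d L' m hd hL' hm hLne, ?_⟩
      intro d m hd hm
      rw [hfold, ihRow d m hd hm]
      by_cases hmem : d ∈ ns ∧ d ≠ n ∧ m = PySem.Int.mod (md * 10 + d) 225
      · rw [if_pos hmem, if_pos ⟨List.mem_cons_of_mem _ hmem.1, hmem.2⟩]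
      · rw [if_neg hmem, if_neg (by
          rintro ⟨hmem1, hne1, heq1⟩
          rcases List.mem_cons.mp hmem1 with h | h
          · exact hne1 h
          · exact hmem ⟨h, hne1, heq1⟩)]

def mbody (l L : Int) (dp : List (List (List Int))) (md : Int) : List (List (List Int)) :=
  (PySem.List.pyRange 0 10 1).foldl (nbody l L md) dp

theorem midLoop {a' : Int} {l L : Int}
    (hl : 0 ≤ l ∧ l < 10) (hL2 : 2 ≤ L) (hLa : L ≤ a') :
    ∀ (ms : List Int) (dp : List (List (List Int))),
    (∀ x ∈ ms, 0 ≤ x ∧ x < 225) → Sh dp a' →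
    Sh (ms.foldl (mbody l L) dp) a' ∧
    (∀ d L' m : Int, 0 ≤ d ∧ d < 10 → 0 ≤ L' ∧ L' < a' + 1 → 0 ≤ m ∧ m < 225 → L' ≠ L →
      aGet3 (ms.foldl (mbody l L) dp) d L' m = aGet3 dp d L' m) ∧
    (∀ d m : Int, 0 ≤ d ∧ d < 10 → 0 ≤ m ∧ m < 225 →
      aGet3 (ms.foldl (mbody l L) dp) d L m =
        ms.foldl (fun x md => cellStep (fun l' md' => aGet3 dp l' (L - 1) md') d m x (l, md))
          (aGet3 dp d L m)) := by
  intro ms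
  induction ms with
  | nil => intro dp _ hsh; exact ⟨hsh, fun _ _ _ _ _ _ _ => rfl, fun _ _ _ _ => rfl⟩
  | cons md ms ih =>
    intro dp hbnd hsh
    have hmd : 0 ≤ md ∧ md < 225 := hbnd md (by simp)
    have hbnd' : ∀ x ∈ ms, 0 ≤ x ∧ x < 225 := fun x hx => hbnd x (List.mem_cons_of_mem _ hx)
    have hLr : 0 ≤ L ∧ L < a' + 1 := ⟨by omega, by omega⟩
    have hL1r : 0 ≤ L - 1 ∧ L - 1 < a' + 1 := ⟨by omega, by omega⟩
    have hR10 : ∀ x ∈ PySem.List.pyRange 0 10 1, 0 ≤ x ∧ x < 10 := by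
      intro x hx; exact PySem.List.mem_pyRange_one.mp hx
    obtain ⟨nSh, nOther, nRow⟩ :=
      nextLoop hl hmd hL2 hLa (PySem.List.pyRange 0 10 1) dp hR10
        (PySem.List.nodup_pyRange_one 0 10) hsh
    set dp1 := mbody l L dp md with hdp1
    obtain ⟨ihSh, ihOther, ihRow⟩ := ih dp1 hbnd' nSh
    have hfold : (md :: ms).foldl (mbody l L) dp = ms.foldl (mbody l L) dp1 := rfl
    refine ⟨by rw [hfold]; exact ihSh, ?_, ?_⟩
    · intro d L' m hd hL' hm hLne
      rw [hfold, ihOther d L' m hd hL' hm hLne]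
      exact nOther d L' m hd hL' hm hLne
    · intro d m hd hm
      rw [hfold, ihRow d m hd hm, List.foldl_cons]
      have h1 : aGet3 dp1 d L m =
          cellStep (fun l' md' => aGet3 dp l' (L - 1) md') d m (aGet3 dp d L m) (l, md) := by
        rw [hdp1]
        show aGet3 ((PySem.List.pyRange 0 10 1).foldl (nbody l L md) dp) d L m = _
        rw [nRow d m hd hm]
        simp only [cellStep]
        by_cases hc : d ≠ l ∧ m = PySem.Int.mod (md * 10 + d) 225
        · rw [if_pos ⟨PySem.List.mem_pyRange_one.mpr ⟨hd.1, hd.2⟩, hc⟩, if_pos hc]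
        · rw [if_neg (by tauto), if_neg hc]
      rw [← h1]
      apply PySem.List.foldl_congr_mem
      intro x md' hmd'
      have hmd'r : 0 ≤ md' ∧ md' < 225 := hbnd' md' hmd'
      simp only [cellStep]
      have hunch : aGet3 dp1 l (L - 1) md' = aGet3 dp l (L - 1) md' :=
        nOther l (L-1) md' hl hL1r hmd'r (by omega)
      by_cases hc : d ≠ l ∧ m = PySem.Int.mod (md' * 10 + d) 225
      · rw [if_pos hc, if_pos hc, hunch]
      · rw [if_neg hc, if_neg hc]

def lbody (L : Int) (dp : List (List (List Int))) (l : Int) : List (List (List Int)) :=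
  (PySem.List.pyRange 0 225 1).foldl (mbody l L) dp

theorem lastLoop {a' : Int} {L : Int} (hL2 : 2 ≤ L) (hLa : L ≤ a') :
    ∀ (ls : List Int) (dp : List (List (List Int))),
    (∀ x ∈ ls, 0 ≤ x ∧ x < 10) → Sh dp a' →
    Sh (ls.foldl (lbody L) dp) a' ∧
    (∀ d L' m : Int, 0 ≤ d ∧ d < 10 → 0 ≤ L' ∧ L' < a' + 1 → 0 ≤ m ∧ m < 225 → L' ≠ L →
      aGet3 (ls.foldl (lbody L) dp) d L' m = aGet3 dp d L' m) ∧
    (∀ d m : Int, 0 ≤ d ∧ d < 10 → 0 ≤ m ∧ m < 225 →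
      aGet3 (ls.foldl (lbody L) dp) d L m =
        (ls.flatMap (fun l => (PySem.List.pyRange 0 225 1).map (fun md => (l, md)))).foldl
          (cellStep (fun l' md' => aGet3 dp l' (L - 1) md') d m) (aGet3 dp d L m)) := by
  intro ls
  induction ls with
  | nil => intro dp _ hsh; exact ⟨hsh, fun _ _ _ _ _ _ _ => rfl, fun _ _ _ _ => rfl⟩
  | cons l ls ih =>
    intro dp hbnd hsh
    have hl : 0 ≤ l ∧ l < 10 := hbnd l (by simp)
    have hbnd' : ∀ x ∈ ls, 0 ≤ x ∧ x < 10 := fun x hx => hbnd x (List.mem_cons_of_mem _ hx)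
    have hL1r : 0 ≤ L - 1 ∧ L - 1 < a' + 1 := ⟨by omega, by omega⟩
    have hR225 : ∀ x ∈ PySem.List.pyRange 0 225 1, 0 ≤ x ∧ x < 225 := by
      intro x hx; exact PySem.List.mem_pyRange_one.mp hx
    obtain ⟨mSh, mOther, mRow⟩ := midLoop hl hL2 hLa (PySem.List.pyRange 0 225 1) dp hR225 hsh
    set dp1 := lbody L dp l with hdp1
    obtain ⟨ihSh, ihOther, ihRow⟩ := ih dp1 hbnd' mSh
    have hfold : (l :: ls).foldl (lbody L) dp = ls.foldl (lbody L) dp1 := rfl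
    refine ⟨by rw [hfold]; exact ihSh, ?_, ?_⟩
    · intro d L' m hd hL' hm hLne
      rw [hfold, ihOther d L' m hd hL' hm hLne]
      exact mOther d L' m hd hL' hm hLne
    · intro d m hd hm
      rw [hfold, ihRow d m hd hm, List.flatMap_cons, List.foldl_append]
      have h1 : aGet3 dp1 d L m =
          ((PySem.List.pyRange 0 225 1).map (fun md => (l, md))).foldl
            (cellStep (fun l' md' => aGet3 dp l' (L - 1) md') d m) (aGet3 dp d L m) := by
        rw [hdp1]
        show aGet3 ((PySem.List.pyRange 0 225 1).foldl (mbody l L) dp) d L m = _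
        rw [mRow d m hd hm, List.foldl_map]
      rw [← h1]
      apply PySem.List.foldl_congr_mem
      intro x p hp
      obtain ⟨l', hl', hp'⟩ := List.mem_flatMap.mp hp
      obtain ⟨md', hmd', rfl⟩ := List.mem_map.mp hp'
      have hl'r : 0 ≤ l' ∧ l' < 10 := hbnd' l' hl'
      have hmd'r : 0 ≤ md' ∧ md' < 225 := PySem.List.mem_pyRange_one.mp hmd'
      simp only [cellStep]
      have hunch : aGet3 dp1 l' (L - 1) md' = aGet3 dp l' (L - 1) md' :=
        mOther l' (L-1) md' hl'r hL1r hmd'r (by omega)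
      by_cases hc : d ≠ l' ∧ m = PySem.Int.mod (md' * 10 + d) 225
      · rw [if_pos hc, if_pos hc, hunch]
      · rw [if_neg hc, if_neg hc]

def Fstep (t : Int → Int → Int) (d nm : Int) : Int :=
  PySem.Int.mod
    ((((PySem.List.pyRange 0 225 1).filter
        (fun m => PySem.Int.mod (10 * m + d) 225 == nm)).map
      (fun m =>
        PySem.Int.mod (((PySem.List.pyRange 0 10 1).map (fun l => t l m)).sum) pyMOD
          - t d m)).sum) pyMOD

theorem pyMOD_num : pyMOD = 1000000007 := by norm_num [pyMOD]
theorem pyMOD_pos : 0 < pyMOD := by norm_num [pyMOD]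

theorem cellFold_sum (t : Int → Int → Int) (d m : Int) :
    ∀ (ps : List (Int × Int)) (x S : Int), x = S % pyMOD →
    ps.foldl (cellStep t d m) x =
      (S + ((ps.filter (fun p => decide (d ≠ p.1 ∧ m = PySem.Int.mod (p.2 * 10 + d) 225))).map
        (fun p => t p.1 p.2)).sum) % pyMOD := by
  intro ps
  induction ps with
  | nil => intro x S hx; simpa using hx
  | cons p ps ih =>
    intro x S hx
    rw [List.foldl_cons]
    by_cases hc : d ≠ p.1 ∧ m = PySem.Int.mod (p.2 * 10 + d) 225
    · have hstep : cellStep t d m x p = (S + t p.1 p.2) % pyMOD := by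
        rw [cellStep, if_pos hc, PySem.Int.mod_eq_emod_of_pos pyMOD_pos, hx, pyMOD_num]
        omega
      rw [hstep, ih _ (S + t p.1 p.2) rfl, List.filter_cons, if_pos (by simpa using hc)]
      simp only [List.map_cons, List.sum_cons]
      rw [add_assoc]
    · have hstep : cellStep t d m x p = x := by rw [cellStep, if_neg hc]
      rw [hstep, ih x S hx, List.filter_cons, if_neg (by simpa using hc)]

theorem list_range_sum (n : Nat) (f : Nat → Int) :
    ((List.range n).map f).sum = ∑ i ∈ Finset.range n, f i := by
  induction n with
  | zero => simp
  | succ k ih => rw [List.range_succ, Finset.sum_range_succ, List.map_append, List.sum_append, ih]; simp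

theorem sum_map_pyRangeN (n : Nat) (f : Int → Int) :
    ((PySem.List.pyRange 0 (n : Int) 1).map f).sum = ∑ i ∈ Finset.range n, f (i : Int) := by
  rw [PySem.List.pyRange_zero_natCast, List.map_map, list_range_sum]
  rfl

theorem listFilterSum (l : List Int) (q : Int → Bool) (g : Int → Int) :
    ((l.filter q).map g).sum = (l.map (fun x => if q x then g x else 0)).sum := by
  induction l with
  | nil => rfl
  | cons x l ih =>
    rw [List.filter_cons, List.map_cons, List.sum_cons]
    by_cases hq : q x
    · rw [if_pos hq, List.map_cons, List.sum_cons, ih, if_pos hq]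
    · rw [if_neg hq, ih, if_neg hq]; omega

theorem sum_map_filter_flatMap (ls : List Int) (f : Int → List (Int × Int))
    (q : Int × Int → Bool) (g : Int × Int → Int) :
    (((ls.flatMap f).filter q).map g).sum =
      (ls.map (fun l => (((f l).filter q).map g).sum)).sum := by
  induction ls with
  | nil => rfl
  | cons l ls ih =>
    rw [List.flatMap_cons, List.filter_append, List.map_append, List.sum_append, ih,
      List.map_cons, List.sum_cons]

theorem erase_sum (t : Int → Int → Int) (d w : Int) (hd : 0 ≤ d ∧ d < 10) :
    (∑ l ∈ Finset.range 10, if d ≠ (l : Int) then t (l : Int) w else 0) =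
      (∑ l ∈ Finset.range 10, t (l : Int) w) - t d w := by
  rw [← Finset.sum_filter]
  have h1 : (Finset.range 10).filter (fun l : Nat => d ≠ (l : Int)) =
      (Finset.range 10).erase d.toNat := by
    ext l
    simp only [Finset.mem_filter, Finset.mem_erase, Finset.mem_range]
    omega
  rw [h1, Finset.sum_erase_eq_sub (by simp [Finset.mem_range]; omega)]
  congr 2
  omega

theorem pairSum_eq_Fstep (t : Int → Int → Int) (d m : Int) (hd : 0 ≤ d ∧ d < 10) :
    ((((PySem.List.pyRange 0 10 1).flatMap
        (fun l => (PySem.List.pyRange 0 225 1).map (fun md => (l, md)))).filter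
        (fun p => decide (d ≠ p.1 ∧ m = PySem.Int.mod (p.2 * 10 + d) 225))).map
      (fun p => t p.1 p.2)).sum % pyMOD = Fstep t d m := by
  have h225 : (0:Int) < 225 := by norm_num
  -- LHS to nested Finset sums
  rw [sum_map_filter_flatMap]
  have hinner : ∀ l : Int,
      ((((PySem.List.pyRange 0 225 1).map (fun md => (l, md))).filter
        (fun p => decide (d ≠ p.1 ∧ m = PySem.Int.mod (p.2 * 10 + d) 225))).map
        (fun p => t p.1 p.2)).sum =
      ∑ md ∈ Finset.range 225,
        if d ≠ l ∧ m = (PySem.Int.mod ((md : Int) * 10 + d) 225) then t l (md : Int) else 0 := by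
    intro l
    rw [List.filter_map, List.map_map, listFilterSum]
    have : (10:Int) = ((10:Nat) : Int) := by norm_num
    rw [show ((225:Int)) = ((225:Nat) : Int) from by norm_num, sum_map_pyRangeN]
    apply Finset.sum_congr rfl
    intro md _
    simp only [Function.comp_apply, decide_eq_true_eq]
  have houter :
      ((PySem.List.pyRange 0 10 1).map (fun l =>
        ((((PySem.List.pyRange 0 225 1).map (fun md => (l, md))).filter
          (fun p => decide (d ≠ p.1 ∧ m = PySem.Int.mod (p.2 * 10 + d) 225))).map
          (fun p => t p.1 p.2)).sum)).sum =
      ∑ l ∈ Finset.range 10, ∑ md ∈ Finset.range 225,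
        if d ≠ (l:Int) ∧ m = (PySem.Int.mod ((md : Int) * 10 + d) 225) then t (l:Int) (md : Int) else 0 := by
    rw [show ((10:Int)) = ((10:Nat) : Int) from by norm_num, sum_map_pyRangeN]
    exact Finset.sum_congr rfl (fun l _ => hinner (l:Int))
  rw [houter, Finset.sum_comm]
  -- RHS to Finset sums
  unfold Fstep
  rw [listFilterSum, show ((225:Int)) = ((225:Nat) : Int) from by norm_num, sum_map_pyRangeN]
  rw [PySem.Int.mod_eq_emod_of_pos pyMOD_pos]
  have hcol : ∀ md : Int,
      ((PySem.List.pyRange 0 10 1).map (fun l => t l md)).sum =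
        ∑ l ∈ Finset.range 10, t (l:Int) md := by
    intro md
    rw [show ((10:Int)) = ((10:Nat) : Int) from by norm_num, sum_map_pyRangeN]
  -- both outer sums mod pyMOD, termwise equal mod
  push_cast
  rw [Finset.sum_int_mod]
  conv_rhs => rw [Finset.sum_int_mod]
  congr 1
  apply Finset.sum_congr rfl
  intro md _
  by_cases hC : m = PySem.Int.mod ((md:Int) * 10 + d) 225
  · have hC' : (PySem.Int.mod (10 * (md:Int) + d) 225 == m) = true := by
      rw [beq_iff_eq, show 10 * (md:Int) + d = (md:Int) * 10 + d from by ring]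
      omega
    rw [if_pos hC', hcol]
    have hsimp : (∑ l ∈ Finset.range 10,
        if d ≠ (l:Int) ∧ m = PySem.Int.mod ((md:Int) * 10 + d) 225 then t (l:Int) (md:Int) else 0) =
        ∑ l ∈ Finset.range 10, if d ≠ (l:Int) then t (l:Int) (md:Int) else 0 := by
      apply Finset.sum_congr rfl
      intro l _
      by_cases hdl : d ≠ (l:Int)
      · rw [if_pos ⟨hdl, hC⟩, if_pos hdl]
      · rw [if_neg (by tauto), if_neg hdl]
    rw [hsimp, erase_sum t d (md:Int) hd,
      PySem.Int.mod_eq_emod_of_pos pyMOD_pos, pyMOD_num]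
    omega
  · have hC' : ¬ ((PySem.Int.mod (10 * (md:Int) + d) 225 == m) = true) := by
      rw [beq_iff_eq, show 10 * (md:Int) + d = (md:Int) * 10 + d from by ring]
      omega
    rw [if_neg hC']
    have hsimp : (∑ l ∈ Finset.range 10,
        if d ≠ (l:Int) ∧ m = PySem.Int.mod ((md:Int) * 10 + d) 225 then t (l:Int) (md:Int) else 0) = 0 := by
      apply Finset.sum_eq_zero
      intro l _
      rw [if_neg (by tauto)]
    rw [hsimp]

theorem Fstep_congr {t t' : Int → Int → Int}
    (h : ∀ l m : Int, 0 ≤ l ∧ l < 10 → 0 ≤ m ∧ m < 225 → t l m = t' l m)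
    (d nm : Int) (hd : 0 ≤ d ∧ d < 10) : Fstep t d nm = Fstep t' d nm := by
  unfold Fstep
  congr 1
  refine congrArg List.sum (List.map_congr_left ?_)
  intro m hm
  have hmr : 0 ≤ m ∧ m < 225 := PySem.List.mem_pyRange_one.mp (List.mem_of_mem_filter hm)
  have hcol : ((PySem.List.pyRange 0 10 1).map (fun l => t l m)).sum =
      ((PySem.List.pyRange 0 10 1).map (fun l => t' l m)).sum := by
    congr 1
    apply List.map_congr_left
    intro l hl
    exact h l m (PySem.List.mem_pyRange_one.mp hl) hmr
  rw [hcol, h d m hd hmr]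

theorem layerEq {a' L : Int} (hL2 : 2 ≤ L) (hLa : L ≤ a')
    (dp : List (List (List Int))) (hsh : Sh dp a')
    (hzero : ∀ d m : Int, 0 ≤ d ∧ d < 10 → 0 ≤ m ∧ m < 225 → aGet3 dp d L m = 0) :
    Sh ((PySem.List.pyRange 0 10 1).foldl (lbody L) dp) a' ∧
    (∀ d L' m : Int, 0 ≤ d ∧ d < 10 → 0 ≤ L' ∧ L' < a' + 1 → 0 ≤ m ∧ m < 225 → L' ≠ L →
      aGet3 ((PySem.List.pyRange 0 10 1).foldl (lbody L) dp) d L' m = aGet3 dp d L' m) ∧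
    (∀ d m : Int, 0 ≤ d ∧ d < 10 → 0 ≤ m ∧ m < 225 →
      aGet3 ((PySem.List.pyRange 0 10 1).foldl (lbody L) dp) d L m =
        Fstep (fun l' md' => aGet3 dp l' (L - 1) md') d m) := by
  have hR10 : ∀ x ∈ PySem.List.pyRange 0 10 1, 0 ≤ x ∧ x < 10 := by
    intro x hx; exact PySem.List.mem_pyRange_one.mp hx
  obtain ⟨lSh, lOther, lRow⟩ := lastLoop hL2 hLa (PySem.List.pyRange 0 10 1) dp hR10 hsh
  refine ⟨lSh, lOther, ?_⟩
  intro d m hd hm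
  rw [lRow d m hd hm, hzero d m hd hm,
    cellFold_sum _ d m _ 0 0 (by rw [pyMOD_num]; omega), zero_add]
  exact pairSum_eq_Fstep (fun l' md' => aGet3 dp l' (L - 1) md') d m hd

def f0 : Int → Int → Int := fun d m => if m = PySem.Int.mod d 225 then 1 else 0

theorem initLoop {a' : Int} (ha : 1 ≤ a') :
    ∀ (is : List Int) (dp : List (List (List Int))),
    (∀ x ∈ is, 0 ≤ x ∧ x < 10) → is.Nodup → Sh dp a' →
    Sh (is.foldl (fun dp i => aSet3 dp i 1 (PySem.Int.mod i 225) 1) dp) a' ∧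
    (∀ d L m : Int, 0 ≤ d ∧ d < 10 → 0 ≤ L ∧ L < a' + 1 → 0 ≤ m ∧ m < 225 →
      aGet3 (is.foldl (fun dp i => aSet3 dp i 1 (PySem.Int.mod i 225) 1) dp) d L m =
        if d ∈ is ∧ L = 1 ∧ m = PySem.Int.mod d 225 then 1 else aGet3 dp d L m) := by
  intro is
  induction is with
  | nil => intro dp _ _ hsh; exact ⟨hsh, fun d L m _ _ _ => by simp⟩
  | cons i is ih =>
    intro dp hbnd hnd hsh
    have hi : 0 ≤ i ∧ i < 10 := hbnd i (by simp)
    have hnotmem : i ∉ is := (List.nodup_cons.mp hnd).1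
    have hmi : 0 ≤ PySem.Int.mod i 225 ∧ PySem.Int.mod i 225 < 225 := by
      rw [PySem.Int.mod_eq_emod_of_pos (by norm_num)]
      exact ⟨Int.emod_nonneg _ (by norm_num), Int.emod_lt_of_pos _ (by norm_num)⟩
    have h1r : (0:Int) ≤ 1 ∧ (1:Int) < a' + 1 := ⟨by omega, by omega⟩
    set X := aSet3 dp i 1 (PySem.Int.mod i 225) 1 with hX
    have hshX : Sh X a' := sh_set3 hsh _ hi h1r hmi.1
    obtain ⟨ihSh, ihRead⟩ := ih X (fun x hx => hbnd x (List.mem_cons_of_mem _ hx))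
      (List.nodup_cons.mp hnd).2 hshX
    refine ⟨ihSh, ?_⟩
    intro d L m hd hL hm
    rw [List.foldl_cons, ← hX, ihRead d L m hd hL hm]
    by_cases hc1 : d ∈ is ∧ L = 1 ∧ m = PySem.Int.mod d 225
    · rw [if_pos hc1, if_pos ⟨List.mem_cons_of_mem _ hc1.1, hc1.2⟩]
    · rw [if_neg hc1, hX, get3_set3 hsh _ hi h1r hmi hd hL hm]
      by_cases hc2 : d = i ∧ L = 1 ∧ m = PySem.Int.mod i 225
      · rw [if_pos hc2, if_pos ⟨hc2.1 ▸ List.mem_cons_self .., hc2.2.1,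
          hc2.2.2.trans (by rw [hc2.1])⟩]
      · rw [if_neg hc2, if_neg (by
          rintro ⟨hmem, hL1, hmeq⟩
          rcases List.mem_cons.mp hmem with h | h
          · exact hc2 ⟨h, hL1, hmeq.trans (by rw [h])⟩
          · exact hc1 ⟨h, hL1, hmeq⟩)]

theorem dp0_facts (a : Int) (ha : 1 ≤ a) :
    Sh ((PySem.List.pyRange 0 10 1).map (fun _ =>
      (PySem.List.pyRange 0 (a + 1) 1).map (fun _ =>
        (PySem.List.pyRange 0 225 1).map (fun _ => (0 : Int))))) a ∧
    (∀ d L m : Int, 0 ≤ d ∧ d < 10 → 0 ≤ L ∧ L < a + 1 → 0 ≤ m ∧ m < 225 →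
      aGet3 ((PySem.List.pyRange 0 10 1).map (fun _ =>
        (PySem.List.pyRange 0 (a + 1) 1).map (fun _ =>
          (PySem.List.pyRange 0 225 1).map (fun _ => (0 : Int))))) d L m = 0) := by
  constructor
  · refine ⟨by rw [List.length_map, PySem.List.length_pyRange_one]; rfl, ?_⟩
    intro row hrow
    obtain ⟨_, _, rfl⟩ := List.mem_map.mp hrow
    refine ⟨by rw [List.length_map, PySem.List.length_pyRange_one]; omega, ?_⟩
    intro cell hcell
    obtain ⟨_, _, rfl⟩ := List.mem_map.mp hcell
    rw [List.length_map, PySem.List.length_pyRange_one]; rfl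
  · intro d L m hd hL hm
    unfold aGet3
    rw [PySem.List.pyGetD_map_pyRange_of_nonneg _ 10 d _ hd.1 hd.2,
      PySem.List.pyGetD_map_pyRange_of_nonneg _ (a+1) L _ hL.1 hL.2,
      PySem.List.pyGetD_map_pyRange_of_nonneg _ 225 m _ hm.1 hm.2]

theorem aLoop (a : Int) (ha : 1 ≤ a) :
    ∀ k : Nat, (k : Int) ≤ a - 1 →
    Sh ((PySem.List.pyRange 2 (2 + (k : Int)) 1).foldl
        (fun dp length => (PySem.List.pyRange 0 10 1).foldl (lbody length) dp)
        ((PySem.List.pyRange 0 10 1).foldl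
          (fun dp i => aSet3 dp i 1 (PySem.Int.mod i 225) 1)
          ((PySem.List.pyRange 0 10 1).map (fun _ =>
            (PySem.List.pyRange 0 (a + 1) 1).map (fun _ =>
              (PySem.List.pyRange 0 225 1).map (fun _ => (0 : Int))))))) a ∧
    (∀ d m : Int, 0 ≤ d ∧ d < 10 → 0 ≤ m ∧ m < 225 →
      aGet3 ((PySem.List.pyRange 2 (2 + (k : Int)) 1).foldl
        (fun dp length => (PySem.List.pyRange 0 10 1).foldl (lbody length) dp)
        ((PySem.List.pyRange 0 10 1).foldl
          (fun dp i => aSet3 dp i 1 (PySem.Int.mod i 225) 1)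
          ((PySem.List.pyRange 0 10 1).map (fun _ =>
            (PySem.List.pyRange 0 (a + 1) 1).map (fun _ =>
              (PySem.List.pyRange 0 225 1).map (fun _ => (0 : Int)))))))
        d (1 + (k : Int)) m = Fstep^[k] f0 d m) ∧
    (∀ d L m : Int, 0 ≤ d ∧ d < 10 → 0 ≤ m ∧ m < 225 → 1 + (k : Int) < L → L ≤ a →
      aGet3 ((PySem.List.pyRange 2 (2 + (k : Int)) 1).foldl
        (fun dp length => (PySem.List.pyRange 0 10 1).foldl (lbody length) dp)
        ((PySem.List.pyRange 0 10 1).foldl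
          (fun dp i => aSet3 dp i 1 (PySem.Int.mod i 225) 1)
          ((PySem.List.pyRange 0 10 1).map (fun _ =>
            (PySem.List.pyRange 0 (a + 1) 1).map (fun _ =>
              (PySem.List.pyRange 0 225 1).map (fun _ => (0 : Int)))))))
        d L m = 0) := by
  have hR10 : ∀ x ∈ PySem.List.pyRange 0 10 1, 0 ≤ x ∧ x < 10 := by
    intro x hx; exact PySem.List.mem_pyRange_one.mp hx
  obtain ⟨sh0, rd0⟩ := dp0_facts a ha
  obtain ⟨sh1, rd1⟩ := initLoop ha (PySem.List.pyRange 0 10 1) _ hR10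
    (PySem.List.nodup_pyRange_one 0 10) sh0
  intro k
  induction k with
  | zero =>
    intro _
    rw [show PySem.List.pyRange 2 (2 + ((0:Nat) : Int)) 1 = [] from
      PySem.List.pyRange_one_eq_nil (by norm_num)]
    simp only [List.foldl_nil]
    refine ⟨sh1, ?_, ?_⟩
    · intro d m hd hm
      rw [rd1 d (1 + ((0:Nat):Int)) m hd ⟨by omega, by omega⟩ hm]
      simp only [Function.iterate_zero, id]
      have hiff : (d ∈ PySem.List.pyRange 0 10 1 ∧ 1 + ((0:Nat):Int) = 1 ∧
          m = PySem.Int.mod d 225) ↔ m = PySem.Int.mod d 225 := by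
        constructor
        · rintro ⟨-, -, h⟩; exact h
        · intro h; exact ⟨PySem.List.mem_pyRange_one.mpr ⟨hd.1, hd.2⟩, by norm_num, h⟩
      rw [if_congr hiff rfl rfl, rd0 d (1 + ((0:Nat):Int)) m hd ⟨by norm_num, by omega⟩ hm]
      rfl
    · intro d L m hd hm hgt hle
      rw [rd1 d L m hd ⟨by omega, by omega⟩ hm, if_neg (by push_cast at hgt; omega)]
      exact rd0 d L m hd ⟨by omega, by omega⟩ hm
  | succ k ih =>
    intro hk
    have hk' : (k : Int) ≤ a - 1 := by push_cast at hk ⊢; omega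
    obtain ⟨ihSh, ihRow, ihZero⟩ := ih hk'
    have hsplit : PySem.List.pyRange 2 (2 + ((k+1 : Nat) : Int)) 1 =
        PySem.List.pyRange 2 (2 + (k : Int)) 1 ++ [2 + (k : Int)] := by
      rw [show (2 + ((k+1 : Nat) : Int)) = (2 + (k : Int)) + 1 from by push_cast; ring]
      exact PySem.List.pyRange_one_succ_right (by omega)
    rw [hsplit, List.foldl_append, List.foldl_cons, List.foldl_nil]
    have hL2 : (2:Int) ≤ 2 + (k : Int) := by omega
    have hLa : 2 + (k : Int) ≤ a := by push_cast at hk; omega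
    obtain ⟨laySh, layOther, layRow⟩ := layerEq hL2 hLa _ ihSh
      (fun d m hd hm => ihZero d (2 + (k:Int)) m hd hm (by omega) (by omega))
    refine ⟨laySh, ?_, ?_⟩
    · intro d m hd hm
      rw [show (1 + ((k+1 : Nat) : Int)) = 2 + (k : Int) from by push_cast; ring]
      rw [layRow d m hd hm]
      rw [Function.iterate_succ_apply']
      apply Fstep_congr
      · intro l m' hl hm'
        rw [show (2 + (k:Int) - 1) = 1 + (k : Int) from by ring]
        exact ihRow l m' hl hm'
      · exact hd
    · intro d L m hd hm hgt hle
      have hne : L ≠ 2 + (k : Int) := by push_cast at hgt; omega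
      rw [layOther d L m hd ⟨by omega, by omega⟩ hm hne]
      exact ihZero d L m hd hm (by push_cast at hgt ⊢; omega) hle

def mapform (g : Int → Int → Int) : List (List Int) :=
  (PySem.List.pyRange 0 10 1).map (fun d => (PySem.List.pyRange 0 225 1).map (g d))

theorem mapform_read (g : Int → Int → Int) {d m : Int}
    (hd : 0 ≤ d ∧ d < 10) (hm : 0 ≤ m ∧ m < 225) :
    bGet2 (mapform g) d m = g d m := by
  unfold bGet2 mapform
  rw [PySem.List.pyGetD_map_pyRange_of_nonneg _ 10 d _ hd.1 hd.2,
    PySem.List.pyGetD_map_pyRange_of_nonneg _ 225 m _ hm.1 hm.2]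

def preTbl : List (List (List Int)) :=
  (PySem.List.pyRange 0 10 1).map (fun d =>
    (PySem.List.pyRange 0 225 1).map (fun nm =>
      (PySem.List.pyRange 0 225 1).filter
        (fun m => PySem.Int.mod (10 * m + d) 225 == nm)))

theorem preTbl_read {d nm : Int} (hd : 0 ≤ d ∧ d < 10) (hnm : 0 ≤ nm ∧ nm < 225) :
    bGetL preTbl d nm =
      (PySem.List.pyRange 0 225 1).filter (fun m => PySem.Int.mod (10 * m + d) 225 == nm) := by
  unfold bGetL preTbl
  rw [PySem.List.pyGetD_map_pyRange_of_nonneg _ 10 d _ hd.1 hd.2,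
    PySem.List.pyGetD_map_pyRange_of_nonneg _ 225 nm _ hnm.1 hnm.2]

def bstep (cur : List (List Int)) : List (List Int) :=
  let col : List Int := (PySem.List.pyRange 0 225 1).map (fun m =>
    PySem.Int.mod (((PySem.List.pyRange 0 10 1).map (fun d => bGet2 cur d m)).sum) pyMOD)
  (PySem.List.pyRange 0 10 1).map (fun d =>
    (PySem.List.pyRange 0 225 1).map (fun nm =>
      PySem.Int.mod
        (((bGetL preTbl d nm).map
          (fun m => PySem.List.pyGetD col m 0 - bGet2 cur d m)).sum) pyMOD))

theorem bstep_mapform (g : Int → Int → Int) :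
    bstep (mapform g) = mapform (Fstep g) := by
  unfold bstep mapform
  apply List.map_congr_left
  intro d hd
  have hdr : 0 ≤ d ∧ d < 10 := PySem.List.mem_pyRange_one.mp hd
  apply List.map_congr_left
  intro nm hnm
  have hnmr : 0 ≤ nm ∧ nm < 225 := PySem.List.mem_pyRange_one.mp hnm
  rw [show ((PySem.List.pyRange 0 10 1).map (fun d =>
      (PySem.List.pyRange 0 225 1).map (g d))) = mapform g from rfl]
  rw [preTbl_read hdr hnmr]
  unfold Fstep
  congr 1
  refine congrArg List.sum (List.map_congr_left ?_)
  intro m hm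
  have hmr : 0 ≤ m ∧ m < 225 :=
    PySem.List.mem_pyRange_one.mp (List.mem_of_mem_filter hm)
  rw [PySem.List.pyGetD_map_pyRange_of_nonneg _ 225 m _ hmr.1 hmr.2,
    mapform_read g hdr hmr]
  congr 2
  refine congrArg List.sum (List.map_congr_left ?_)
  intro l hl
  exact mapform_read g (PySem.List.mem_pyRange_one.mp hl) hmr

theorem bLoop (xs : List Int) : ∀ (g : Int → Int → Int),
    xs.foldl (fun cur _ => bstep cur) (mapform g) = mapform (Fstep^[xs.length] g) := by
  induction xs with
  | nil => intro g; rfl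
  | cons x xs ih =>
    intro g
    rw [List.foldl_cons, bstep_mapform, ih (Fstep g), List.length_cons,
      Function.iterate_succ_apply]

theorem iter_congr : ∀ (k : Nat) (t t' : Int → Int → Int),
    (∀ l m : Int, 0 ≤ l ∧ l < 10 → 0 ≤ m ∧ m < 225 → t l m = t' l m) →
    ∀ d m : Int, 0 ≤ d ∧ d < 10 → 0 ≤ m ∧ m < 225 →
      Fstep^[k] t d m = Fstep^[k] t' d m := by
  intro k
  induction k with
  | zero => intro t t' h d m hd hm; exact h d m hd hm
  | succ k ih =>
    intro t t' h d m hd hm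
    rw [Function.iterate_succ_apply', Function.iterate_succ_apply']
    exact Fstep_congr (fun l m' hl hm' => ih t t' h l m' hl hm') d m hd

def bg0 : Int → Int → Int := fun d m => if m == PySem.Int.mod d 225 then 1 else 0

set_option maxHeartbeats 2000000 in
theorem main_eq (a b : Int) (ha : 1 ≤ a) :
    count_interesting_numbers a b = count_interesting_numbers_alt a b := by
  have hb : 0 ≤ PySem.Int.mod b 225 ∧ PySem.Int.mod b 225 < 225 := by
    rw [PySem.Int.mod_eq_emod_of_pos (by norm_num)]
    exact ⟨Int.emod_nonneg _ (by norm_num), Int.emod_lt_of_pos _ (by norm_num)⟩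
  set k := (a - 1).toNat with hk
  have hk1 : (2 + ((k:Nat) : Int)) = a + 1 := by omega
  have hk2 : (1 + ((k:Nat) : Int)) = a := by omega
  obtain ⟨-, hrow, -⟩ := aLoop a ha k (by omega)
  have hA : count_interesting_numbers a b =
      PySem.Int.mod
        (((PySem.List.pyRange 0 10 1).map (fun digit =>
          aGet3 ((PySem.List.pyRange 2 (2 + ((k:Nat) : Int)) 1).foldl
            (fun dp length => (PySem.List.pyRange 0 10 1).foldl (lbody length) dp)
            ((PySem.List.pyRange 0 10 1).foldl
              (fun dp i => aSet3 dp i 1 (PySem.Int.mod i 225) 1)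
              ((PySem.List.pyRange 0 10 1).map (fun _ =>
                (PySem.List.pyRange 0 (a + 1) 1).map (fun _ =>
                  (PySem.List.pyRange 0 225 1).map (fun _ => (0 : Int)))))))
            digit (1 + ((k:Nat) : Int)) (PySem.Int.mod b 225))).sum) pyMOD := by
    rw [hk1, hk2]
    rfl
  have hB : count_interesting_numbers_alt a b =
      PySem.Int.mod
        (((PySem.List.pyRange 0 10 1).map (fun d =>
          bGet2 ((PySem.List.pyRange 0 (a - 1) 1).foldl (fun cur _ => bstep cur)
            (mapform bg0)) d (PySem.Int.mod b 225))).sum) pyMOD := rfl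
  rw [hA, hB, bLoop, PySem.List.length_pyRange_one, show (a - 1 - 0).toNat = k from by omega]
  congr 1
  refine congrArg List.sum (List.map_congr_left ?_)
  intro d hd
  have hdr : 0 ≤ d ∧ d < 10 := PySem.List.mem_pyRange_one.mp hd
  rw [hrow d (PySem.Int.mod b 225) hdr hb, mapform_read _ hdr hb]
  apply iter_congr k f0 bg0
  · intro l m _ _
    unfold f0 bg0
    by_cases h : m = PySem.Int.mod l 225
    · rw [if_pos h, if_pos (beq_iff_eq.mpr h)]
    · rw [if_neg h, if_neg (by simpa using h)]
  · exact hdr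
  · exact hb

-- ===== VERDICT (by name: the statement is the Claim_ definition above) =====
theorem count_interesting_numbers_spec : Claim_equal_count_interesting_numbers := by
  intro a b _ hpre
  unfold Spec_count_interesting_numbers
  exact main_eq a b hpre
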